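-- pv_equiv track=rewrite | github.com/c0m1x/Football-Analysis | backend/api/routes/real_fixtures.py | _mode_str
-- ===== SOURCE A (Python) =====
-- def _mode_str(values):
--     values = [v for v in values if isinstance(v, str) and v]
--     if not values:
--         return None
--     counts = {}
--     for v in values:
--         counts[v] = counts.get(v, 0) + 1
--     return sorted(counts.items(), key=lambda kv: (-kv[1], kv[0]))[0][0]
-- ===== SOURCE B (Python) =====
-- def _mode_str(values):
--     vals = sorted(v for v in values if isinstance(v, str) and v)
--     if not vals:
--         return None
--     best, best_n, cur, cur_n = "", 0, "", 0
--     for v in vals: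
--         cur_n = cur_n + 1 if v == cur else 1
--         cur = v
--         if cur_n > best_n:
--             best, best_n = v, cur_n
--     return best
-- ===== Notes on version B (the rewrite author's own statement) =====
-- stated objective: alternative
-- what changed: Replaces the count-dict plus full sort of (value, count) pairs by a composite lambda key with a sort of the values themselves followed by one run-length scan keeping the strictly longest run (no dict; strict > preserves the alphabetical tie-break).
import Mathlib
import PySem

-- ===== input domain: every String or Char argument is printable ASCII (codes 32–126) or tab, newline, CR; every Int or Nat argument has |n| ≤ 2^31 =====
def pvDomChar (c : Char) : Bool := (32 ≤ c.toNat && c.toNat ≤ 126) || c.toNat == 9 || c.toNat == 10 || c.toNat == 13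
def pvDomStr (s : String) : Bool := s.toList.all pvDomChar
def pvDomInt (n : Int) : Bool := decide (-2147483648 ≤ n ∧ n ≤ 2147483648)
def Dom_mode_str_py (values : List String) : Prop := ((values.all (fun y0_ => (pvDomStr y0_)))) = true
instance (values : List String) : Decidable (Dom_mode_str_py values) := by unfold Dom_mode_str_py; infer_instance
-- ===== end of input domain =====

-- B replaces A's count-dict + sort of (value, count) pairs by a composite key with a
-- sort of the values themselves followed by one run-length scan (no dict): alternative algorithm.


-- ===== PORT A =====
-- values = [v for v in values if isinstance(v, str) and v]; if not values: return None;
-- counts[v] = counts.get(v, 0) + 1; return sorted(counts.items(), key=lambda kv: (-kv[1], kv[0]))[0][0]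
def mode_str_py (values : List String) : Option String :=
  let vals := values.filter (fun v => v ≠ "")
  if vals = [] then none
  else
    let counts : PySem.Dict String Int :=
      vals.foldl (fun d v => d.insert v (d.getD v 0 + 1)) PySem.Dict.empty
    match PySem.List.pyGet?
        (PySem.List.sorted2 counts.items (fun kv => -kv.2) (fun kv => kv.1)) 0 with
    | some kv => some kv.1
    | none => none

-- ===== PORT B =====
-- the loop body: state ((best, best_n), (cur, cur_n)); extend or restart the run, keep it if strictly longer
def pvStep (st : (String × Int) × (String × Int)) (v : String) : (String × Int) × (String × Int) :=
  let n : Int := if v = st.2.1 then st.2.2 + 1 else 1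
  if n > st.1.2 then ((v, n), (v, n)) else (st.1, (v, n))

-- vals = sorted(filtered); one run-length scan over the sorted copy
def mode_str_py_alt (values : List String) : Option String :=
  let vals := PySem.List.sorted (values.filter (fun v => v ≠ "")) (fun v => v) false
  if vals = [] then none
  else some ((vals.foldl pvStep (("", 0), ("", 0))).1.1)

-- ===== PRECONDITION & SPEC =====
def Spec_mode_str_py (values : List String) (out : Option String) : Prop := out = mode_str_py_alt values
instance (values : List String) (out : Option String) : Decidable (Spec_mode_str_py values out) := by unfold Spec_mode_str_py; infer_instance

-- ===== CLAIM (what is proved, stated in full; the proofs are below) =====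
def Claim_equal_mode_str_py : Prop := ∀ (values : List String), Dom_mode_str_py values → Spec_mode_str_py values (mode_str_py values)

-- ===== LEMMAS AND PROOFS =====

-- the comparison A's sorted2 uses, for key (-count, value)
def pvBef (a b : String × Int) : Bool :=
  decide (-a.2 < -b.2) || (!decide (-b.2 < -a.2) && decide (a.1 < b.1))

theorem pvBef_iff (a b : String × Int) :
    pvBef a b = true ↔ (b.2 < a.2 ∨ (a.2 = b.2 ∧ a.1 < b.1)) := by
  simp only [pvBef, Bool.or_eq_true, Bool.and_eq_true, Bool.not_eq_eq_eq_not, Bool.not_true,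
    decide_eq_true_eq, decide_eq_false_iff_not]
  constructor
  · rintro (h | ⟨h1, h2⟩)
    · exact Or.inl (by omega)
    · rcases eq_or_lt_of_le (show b.2 ≤ a.2 by omega) with he | hl
      · exact Or.inr ⟨he.symm, h2⟩
      · exact Or.inl hl
  · rintro (h | ⟨h1, h2⟩)
    · exact Or.inl (by omega)
    · exact Or.inr ⟨by omega, h2⟩

theorem pvBef_asymm (a b : String × Int) (h : pvBef a b = true) : pvBef b a = false := by
  rw [Bool.eq_false_iff]
  intro h'
  rw [pvBef_iff] at h h'
  rcases h with h | ⟨h1, h2⟩ <;> rcases h' with h' | ⟨h1', h2'⟩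
  · omega
  · omega
  · omega
  · exact absurd h2' (not_lt.mpr (le_of_lt h2))

theorem pvBef_trans (a b c : String × Int) (h1 : pvBef a b = true) (h2 : pvBef b c = true) :
    pvBef a c = true := by
  rw [pvBef_iff] at *
  rcases h1 with h1 | ⟨h1, h1'⟩ <;> rcases h2 with h2 | ⟨h2, h2'⟩
  · left; omega
  · left; omega
  · left; omega
  · right; exact ⟨by omega, lt_trans h1' h2'⟩

theorem pvBef_irrefl (a : String × Int) : pvBef a a = false := by
  rw [Bool.eq_false_iff]
  intro h
  rw [pvBef_iff] at h
  rcases h with h | ⟨_, h⟩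
  · omega
  · exact absurd h (lt_irrefl _)

-- inserting into a list sorted for an asymmetric transitive `before` keeps it sorted
theorem insertBy_pairwise_not_rev {α : Type} (before : α → α → Bool)
    (hasym : ∀ a b, before a b = true → before b a = false)
    (htrans : ∀ a b c, before a b = true → before b c = true → before a c = true)
    (x : α) (ys : List α)
    (h : ys.Pairwise (fun a b => before b a = false)) :
    (PySem.List.insertBy before x ys).Pairwise (fun a b => before b a = false) := by
  induction ys with
  | nil => simp [PySem.List.insertBy]
  | cons y ys ih =>
    rcases List.pairwise_cons.1 h with ⟨hy, hys⟩
    by_cases hb : before x y = true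
    · rw [show PySem.List.insertBy before x (y :: ys) = x :: y :: ys by
        simp [PySem.List.insertBy, hb]]
      refine List.pairwise_cons.2 ⟨?_, h⟩
      intro z hz
      rcases List.mem_cons.1 hz with rfl | hz
      · exact hasym _ _ hb
      · rw [Bool.eq_false_iff]
        intro hzx
        have := htrans _ _ _ hzx hb
        rw [hy z hz] at this
        exact Bool.noConfusion this
    · rw [show PySem.List.insertBy before x (y :: ys) = y :: PySem.List.insertBy before x ys by
        simp [PySem.List.insertBy, hb]]
      refine List.pairwise_cons.2 ⟨?_, ih hys⟩
      intro z hz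
      rcases (PySem.List.insertBy_mem_iff before x z ys).1 hz with rfl | hz
      · exact Bool.eq_false_iff.mpr hb
      · exact hy z hz

theorem foldl_insertBy_pairwise {α : Type} (before : α → α → Bool)
    (hasym : ∀ a b, before a b = true → before b a = false)
    (htrans : ∀ a b c, before a b = true → before b c = true → before a c = true)
    (xs : List α) (acc : List α)
    (hacc : acc.Pairwise (fun a b => before b a = false)) :
    (xs.foldl (fun acc x => PySem.List.insertBy before x acc) acc).Pairwise
      (fun a b => before b a = false) := by
  induction xs generalizing acc with
  | nil => exact hacc
  | cons x xs ih => exact ih _ (insertBy_pairwise_not_rev before hasym htrans x acc hacc)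

-- the common characterisation: m is a most frequent value of S, alphabetically first among ties
def pvBest (vals : List String) (S : List String) (m : String) : Prop :=
  m ∈ S ∧ ∀ t ∈ S, (vals.count t : Int) < (vals.count m : Int) ∨
    ((vals.count t : Int) = (vals.count m : Int) ∧ m ≤ t)

theorem pvBest_unique (vals : List String) (S : List String) (m₁ m₂ : String)
    (h₁ : pvBest vals S m₁) (h₂ : pvBest vals S m₂) : m₁ = m₂ := by
  rcases h₁ with ⟨hm₁, hd₁⟩
  rcases h₂ with ⟨hm₂, hd₂⟩
  rcases hd₁ m₂ hm₂ with h | ⟨he, hle⟩ <;> rcases hd₂ m₁ hm₁ with h' | ⟨he', hle'⟩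
  · omega
  · omega
  · omega
  · exact le_antisymm hle hle'

-- invariant of B's run-length scan over the processed (sorted) prefix p
def pvInv (p : List String) (st : (String × Int) × (String × Int)) : Prop :=
  (p = [] ∧ st = (("", 0), ("", 0))) ∨
  (p ≠ [] ∧
    st.2.1 ∈ p ∧ (∀ x ∈ p, x ≤ st.2.1) ∧ st.2.2 = (p.count st.2.1 : Int) ∧
    st.1.1 ∈ p ∧ st.1.2 = (p.count st.1.1 : Int) ∧
    (∀ x ∈ p, (p.count x : Int) ≤ st.1.2) ∧
    (∀ x ∈ p, (p.count x : Int) = st.1.2 → st.1.1 ≤ x))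

theorem count_append_singleton (p : List String) (v x : String) :
    (p ++ [v]).count x = p.count x + (if x = v then 1 else 0) := by
  rcases eq_or_ne x v with rfl | hx
  · simp
  · simp [List.count_append, hx, Ne.symm hx]

theorem pvStep_inv (p : List String) (st : (String × Int) × (String × Int)) (v : String)
    (hv : ∀ x ∈ p, x ≤ v) (hinv : pvInv p st) : pvInv (p ++ [v]) (pvStep st v) := by
  obtain ⟨⟨b, bn⟩, c, cn⟩ := st
  rcases hinv with ⟨hp, hst⟩ | ⟨hp, hcm, hcmax, hcn, hbm, hbn, hdom, hmin⟩
  · subst hp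
    injection hst with h1 h2
    injection h1 with hb1 hb2
    injection h2 with hc1 hc2
    subst hb1; subst hb2; subst hc1; subst hc2
    right
    unfold pvStep
    rcases eq_or_ne v "" with rfl | hv0 <;> simp
  · simp only at hcm hcmax hcn hbm hbn hdom hmin
    have hvnp : v = c ∨ v ∉ p := by
      rcases eq_or_ne v c with h | h
      · exact Or.inl h
      · right
        intro hvp
        exact h (le_antisymm (hcmax v hvp) (hv _ hcm))
    have hcntv : (if v = c then cn + 1 else 1) = ((p ++ [v]).count v : Int) := by
      rcases eq_or_ne v c with h | h
      · rw [if_pos h, count_append_singleton, if_pos rfl, h, hcn]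
        push_cast; ring
      · rcases hvnp with h' | h'
        · exact absurd h' h
        · rw [if_neg h, count_append_singleton, if_pos rfl,
            List.count_eq_zero_of_not_mem h']
          simp
    have hcnt : ∀ x, x ≠ v → (p ++ [v]).count x = p.count x := by
      intro x hx
      rw [count_append_singleton, if_neg hx]
      ring
    have hmemv : v ∈ p ++ [v] := List.mem_append_right _ List.mem_cons_self
    have hmaxv : ∀ x ∈ p ++ [v], x ≤ v := by
      intro x hx
      rcases List.mem_append.1 hx with hx | hx
      · exact hv x hx
      · rcases List.mem_singleton.1 hx with rfl
        exact le_refl _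
    right
    refine ⟨by simp, ?_⟩
    unfold pvStep
    simp only
    by_cases hb : (if v = c then cn + 1 else 1) > bn
    · rw [if_pos hb]
      refine ⟨hmemv, hmaxv, hcntv, hmemv, hcntv, ?_, ?_⟩
      · intro x hx
        rcases eq_or_ne x v with rfl | hxv
        · rw [← hcntv]
        · rw [hcnt x hxv]
          rcases List.mem_append.1 hx with hx | hx
          · exact le_of_lt (lt_of_le_of_lt (hdom x hx) hb)
          · exact absurd (List.mem_singleton.1 hx) hxv
      · intro x hx hxc
        rcases eq_or_ne x v with rfl | hxv
        · exact le_refl _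
        · rw [hcnt x hxv] at hxc
          rcases List.mem_append.1 hx with hx | hx
          · exact absurd hxc (ne_of_lt (lt_of_le_of_lt (hdom x hx) hb))
          · exact absurd (List.mem_singleton.1 hx) hxv
    · rw [if_neg hb]
      have hbv : b ≠ v := by
        intro he
        rcases hvnp with h | h
        · rw [if_pos h] at hb
          rw [he, h] at hbn
          rw [hcn] at hb
          omega
        · exact h (he ▸ hbm)
      have hble : (if v = c then cn + 1 else 1) ≤ bn := not_lt.mp hb
      refine ⟨hmemv, hmaxv, hcntv, List.mem_append_left _ hbm,
        by rw [hcnt _ hbv]; exact hbn, ?_, ?_⟩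
      · intro x hx
        rcases eq_or_ne x v with rfl | hxv
        · rw [← hcntv]; exact hble
        · rw [hcnt x hxv]
          rcases List.mem_append.1 hx with hx | hx
          · exact hdom x hx
          · exact absurd (List.mem_singleton.1 hx) hxv
      · intro x hx hxc
        rcases eq_or_ne x v with rfl | hxv
        · exact hv b hbm
        · rw [hcnt x hxv] at hxc
          rcases List.mem_append.1 hx with hx | hx
          · exact hmin x hx hxc
          · exact absurd (List.mem_singleton.1 hx) hxv

theorem alt_fold_inv (l p : List String) (hl : l.Pairwise (· ≤ ·))
    (hpl : ∀ x ∈ p, ∀ y ∈ l, x ≤ y) (st : (String × Int) × (String × Int))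
    (hst : pvInv p st) : pvInv (p ++ l) (l.foldl pvStep st) := by
  induction hl generalizing p st with
  | nil => simpa using hst
  | @cons v l hvl hl' ih =>
    rw [List.foldl_cons, show p ++ v :: l = (p ++ [v]) ++ l by simp]
    refine ih (p ++ [v]) ?_ (pvStep st v)
      (pvStep_inv p st v (fun x hx => hpl x hx v List.mem_cons_self) hst)
    intro x hx y hy
    rcases List.mem_append.1 hx with hx | hx
    · exact hpl x hx y (List.mem_cons_of_mem _ hy)
    · rcases List.mem_singleton.1 hx with rfl
      exact hvl y hy

-- B computes a pvBest element of the distinct values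
theorem alt_best (vals : List String) (hne : vals ≠ []) :
    pvBest vals (PySem.List.dedup vals)
      (((PySem.List.sorted vals (fun v => v) false).foldl pvStep (("", 0), ("", 0))).1.1) := by
  have hperm := PySem.List.sorted_perm vals (fun v => v) false
  have hpair : (PySem.List.sorted vals (fun v => v) false).Pairwise (· ≤ ·) :=
    PySem.List.sorted_pairwise vals (fun v => v)
  have := alt_fold_inv (PySem.List.sorted vals (fun v => v) false) [] hpair
    (by intro x hx; exact absurd hx (List.not_mem_nil)) (("", 0), ("", 0)) (Or.inl ⟨rfl, rfl⟩)
  rw [List.nil_append] at this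
  rcases this with ⟨h1, _⟩ | ⟨_, _, _, _, hbm, hbn, hdom, hmin⟩
  · exact absurd ((PySem.List.sorted_eq_nil_iff vals (fun v => v) false).1 h1) hne
  · have hcount : ∀ x, (PySem.List.sorted vals (fun v => v) false).count x = vals.count x :=
      fun x => hperm.count_eq x
    set r := ((PySem.List.sorted vals (fun v => v) false).foldl pvStep (("", 0), ("", 0)))
    refine ⟨(PySem.List.mem_dedup vals r.1.1).2 (hperm.mem_iff.1 hbm), ?_⟩
    intro t ht
    have htv : t ∈ PySem.List.sorted vals (fun v => v) false :=
      hperm.mem_iff.2 ((PySem.List.mem_dedup vals t).1 ht)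
    have h1 := hdom t htv
    rw [hbn, hcount, hcount] at h1
    rcases eq_or_lt_of_le h1 with he | hl
    · have := hmin t htv (by rw [hbn, hcount, hcount]; exact he)
      exact Or.inr ⟨he, this⟩
    · exact Or.inl hl

-- A's sorted list starts with a pvBest element of the distinct values
theorem a_best (vals : List String) (hne : vals ≠ []) :
    ∃ m t, PySem.List.sorted2 (PySem.Dict.counter vals).items
        (fun kv => -kv.2) (fun kv => kv.1) = m :: t ∧
      pvBest vals (PySem.List.dedup vals) m.1 := by
  have hitems : (PySem.Dict.counter vals).items
      = (PySem.List.dedup vals).map (fun k => (k, (vals.count k : Int))) := by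
    rw [PySem.Dict.items_counter]
    simp
  have hdne : PySem.List.dedup vals ≠ [] := by
    rcases List.exists_mem_of_ne_nil vals hne with ⟨y, hy⟩
    intro hd
    have : y ∈ PySem.List.dedup vals := (PySem.List.mem_dedup vals y).2 hy
    rw [hd] at this
    exact absurd this (List.not_mem_nil)
  have hperm := PySem.List.sorted2_perm (PySem.Dict.counter vals).items
      (fun kv => -kv.2) (fun kv => kv.1) false
  have hlen : (PySem.List.sorted2 (PySem.Dict.counter vals).items
      (fun kv => -kv.2) (fun kv => kv.1)).length ≠ 0 := by
    rw [hperm.length_eq, hitems, List.length_map]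
    intro h0
    exact hdne (List.eq_nil_of_length_eq_zero h0)
  rcases hL : PySem.List.sorted2 (PySem.Dict.counter vals).items
      (fun kv => -kv.2) (fun kv => kv.1) with _ | ⟨m, t⟩
  · rw [hL] at hlen; exact absurd rfl hlen
  refine ⟨m, t, rfl, ?_⟩
  -- the sorted2 call IS the insertBy fold with pvBef
  have hfold : PySem.List.sorted2 (PySem.Dict.counter vals).items
      (fun kv => -kv.2) (fun kv => kv.1)
      = (PySem.Dict.counter vals).items.foldl
          (fun acc x => PySem.List.insertBy pvBef x acc) [] := rfl
  have hpair := foldl_insertBy_pairwise pvBef pvBef_asymm pvBef_trans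
      (PySem.Dict.counter vals).items [] (List.Pairwise.nil)
  rw [← hfold, hL] at hpair
  have hmin : ∀ p ∈ (PySem.Dict.counter vals).items, pvBef p m = false := by
    intro p hp
    have hpL : p ∈ m :: t := by
      rw [← hL]
      exact hperm.mem_iff.2 hp
    rcases List.mem_cons.1 hpL with rfl | hpt
    · exact pvBef_irrefl p
    · exact (List.pairwise_cons.1 hpair).1 p hpt
  have hmmem : m ∈ (PySem.Dict.counter vals).items := by
    have : m ∈ m :: t := List.mem_cons_self
    rw [← hL] at this
    exact hperm.mem_iff.1 this
  rw [hitems] at hmmem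
  rcases List.mem_map.1 hmmem with ⟨k, hk, hkm⟩
  refine ⟨by rw [← hkm]; exact hk, ?_⟩
  intro k' hk'
  have hp' : ((k', (vals.count k' : Int)) : String × Int)
      ∈ (PySem.Dict.counter vals).items := by
    rw [hitems]
    exact List.mem_map.2 ⟨k', hk', rfl⟩
  have hb := hmin _ hp'
  rw [Bool.eq_false_iff, Ne, pvBef_iff] at hb
  push Not at hb
  rcases hb with ⟨h1, h2⟩
  -- m = (k, count k)
  have hm2 : m.2 = (vals.count m.1 : Int) := by rw [← hkm]
  rw [hm2] at h1 h2
  rcases eq_or_lt_of_le h1 with he | hl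
  · exact Or.inr ⟨he, h2 he⟩
  · exact Or.inl hl

-- ===== VERDICT (by name: the statement is the Claim_ definition above) =====
theorem mode_str_py_spec : Claim_equal_mode_str_py := by
  intro values _
  unfold Spec_mode_str_py mode_str_py mode_str_py_alt
  dsimp only
  by_cases h : values.filter (fun v => v ≠ "") = []
  · rw [if_pos h, if_pos ((PySem.List.sorted_eq_nil_iff _ _ _).2 h)]
  · rw [if_neg h, if_neg (fun hs => h ((PySem.List.sorted_eq_nil_iff _ _ _).1 hs))]
    have hcounter : (values.filter (fun v => v ≠ "")).foldl
        (fun d v => d.insert v (d.getD v 0 + 1)) PySem.Dict.empty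
        = PySem.Dict.counter (values.filter (fun v => v ≠ "")) :=
      PySem.Dict.foldl_insert_getD_add_one_eq_counter _
    rcases a_best (values.filter (fun v => v ≠ "")) h with ⟨m, t, hL, hbest⟩
    rw [hcounter, hL, PySem.List.pyGet?_zero_cons]
    have hbest' := alt_best (values.filter (fun v => v ≠ "")) h
    exact congrArg some (pvBest_unique _ _ _ _ hbest hbest')
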